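-- pv_equiv track=rewrite | github.com/Alvaropz/Python_problems_BinarySearch | 1. Easy/furthest_from_origin/furthest_from_origin.py | furthest_from_origin_v_one
-- ===== SOURCE A (Python) =====
-- def furthest_from_origin_v_one(s):
--     list_l = ["L" if char == "?" else char for char in s]
--     list_r = ["R" if char == "?" else char for char in s]
--     total_l = 0
--     total_r = 0
--     for char_l, char_r in zip(list_l,list_r):
--         if char_l == "L":
--             total_l -= 1
--         elif char_l == "R":
--             total_l += 1
--         if char_r == "L":
--             total_r -= 1
--         elif char_r == "R":
--             total_r += 1
--     abs_total_l = abs(total_l)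
--     abs_total_r = abs(total_r)
--     if abs_total_l >= abs_total_r:
--         return abs_total_l
--     else:
--         return abs_total_r
-- ===== SOURCE B (Python) =====
-- def furthest_from_origin_v_one(s):
--     return abs(s.count("R") - s.count("L")) + s.count("?")
-- ===== Notes on version B (the rewrite author's own statement) =====
-- stated objective: simpler
-- what changed: Replaces the two list comprehensions and the per-character branching accumulation loop by a closed-form arithmetic expression on three character counts, using max(|x-q|,|x+q|) = |x|+q.
import Mathlib
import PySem

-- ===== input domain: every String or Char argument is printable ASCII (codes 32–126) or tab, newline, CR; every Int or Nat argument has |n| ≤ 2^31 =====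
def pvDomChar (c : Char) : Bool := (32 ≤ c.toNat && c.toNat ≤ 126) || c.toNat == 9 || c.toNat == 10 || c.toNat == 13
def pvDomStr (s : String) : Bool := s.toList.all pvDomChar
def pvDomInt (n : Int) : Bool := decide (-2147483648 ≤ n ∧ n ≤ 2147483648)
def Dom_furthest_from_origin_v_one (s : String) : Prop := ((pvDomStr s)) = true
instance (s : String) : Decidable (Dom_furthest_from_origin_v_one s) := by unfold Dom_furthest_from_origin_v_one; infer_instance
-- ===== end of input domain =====

-- B replaces A's list comprehensions and branching accumulation loop by a closed-form
-- count expression (|#R - #L| + #?), via the identity max(|x-q|,|x+q|) = |x|+q; objective: simpler.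


-- ===== PORT A =====
def furthest_from_origin_v_one (s : String) : Int :=
  let list_l := s.toList.map (fun c => if c = '?' then 'L' else c)
  let list_r := s.toList.map (fun c => if c = '?' then 'R' else c)
  let totals := (list_l.zip list_r).foldl
    (fun (p : Int × Int) cr =>
      (if cr.1 = 'L' then p.1 - 1 else if cr.1 = 'R' then p.1 + 1 else p.1,
       if cr.2 = 'L' then p.2 - 1 else if cr.2 = 'R' then p.2 + 1 else p.2))
    (0, 0)
  let abs_total_l := |totals.1|
  let abs_total_r := |totals.2|
  if abs_total_l ≥ abs_total_r then abs_total_l else abs_total_r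

-- ===== PORT B =====
def furthest_from_origin_v_one_alt (s : String) : Int :=
  |(PySem.Str.count s "R" : Int) - (PySem.Str.count s "L" : Int)| + (PySem.Str.count s "?" : Int)

-- ===== PRECONDITION & SPEC =====
def Spec_furthest_from_origin_v_one (s : String) (out : Int) : Prop := out = furthest_from_origin_v_one_alt s
instance (s : String) (out : Int) : Decidable (Spec_furthest_from_origin_v_one s out) := by unfold Spec_furthest_from_origin_v_one; infer_instance

-- ===== CLAIM (what is proved, stated in full; the proofs are below) =====
def Claim_equal_furthest_from_origin_v_one : Prop := ∀ (s : String), Dom_furthest_from_origin_v_one s → Spec_furthest_from_origin_v_one s (furthest_from_origin_v_one s)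

-- ===== LEMMAS AND PROOFS =====

-- substring count of a single character equals the element count
theorem count_go_singleton (c : Char) (l : List Char) (fuel : Nat) (acc : Nat)
    (h : l.length ≤ fuel) :
    PySem.Chars.count.go [c] fuel l acc = acc + l.count c := by
  induction l generalizing fuel acc with
  | nil => cases fuel <;> simp [PySem.Chars.count.go]
  | cons hd tl ih =>
    cases fuel with
    | zero => simp at h
    | succ f =>
      simp only [List.length_cons, Nat.succ_le_succ_iff] at h
      by_cases hc : hd = c
      · subst hc
        simp [PySem.Chars.count.go, List.isPrefixOf, ih _ _ h]
        omega
      · have : ([c].isPrefixOf (hd :: tl)) = false := by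
          simp [List.isPrefixOf]
          exact fun h' => (hc h'.symm).elim
        simp [PySem.Chars.count.go, this, ih _ _ h, hc]

theorem count_singleton (c : Char) (l : List Char) :
    PySem.Chars.count l [c] = l.count c := by
  simpa using count_go_singleton c l l.length 0 le_rfl

-- the loop invariant of A's accumulation loop
theorem foldA (l : List Char) (a b : Int) :
    ((l.map (fun c => if c = '?' then 'L' else c)).zip
      (l.map (fun c => if c = '?' then 'R' else c))).foldl
      (fun (p : Int × Int) cr =>
        (if cr.1 = 'L' then p.1 - 1 else if cr.1 = 'R' then p.1 + 1 else p.1,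
         if cr.2 = 'L' then p.2 - 1 else if cr.2 = 'R' then p.2 + 1 else p.2))
      (a, b)
    = (a + l.count 'R' - l.count 'L' - l.count '?',
       b + l.count 'R' - l.count 'L' + l.count '?') := by
  induction l generalizing a b with
  | nil => simp
  | cons hd tl ih =>
    by_cases hq : hd = '?'
    · subst hq
      simp [ih]
      constructor <;> ring
    · by_cases hl : hd = 'L'
      · subst hl
        simp [ih]
        constructor <;> ring
      · by_cases hr : hd = 'R'
        · subst hr
          simp [ih]
          constructor <;> ring
        · simp [hq, hl, hr, ih]

-- ===== VERDICT (by name: the statement is the Claim_ definition above) =====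
theorem furthest_from_origin_v_one_spec : Claim_equal_furthest_from_origin_v_one := by
  intro s _
  unfold Spec_furthest_from_origin_v_one furthest_from_origin_v_one furthest_from_origin_v_one_alt
  simp only [foldA, PySem.Str.count_eq]
  have hR : ("R" : String).toList = ['R'] := rfl
  have hL : ("L" : String).toList = ['L'] := rfl
  have hQ' : ("?" : String).toList = ['?'] := rfl
  rw [hR, hL, hQ', count_singleton, count_singleton, count_singleton]
  set R : Int := ((s.toList.count 'R' : Nat) : Int)
  set L : Int := ((s.toList.count 'L' : Nat) : Int)
  set Q : Int := ((s.toList.count '?' : Nat) : Int)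
  have hQ : 0 ≤ Q := by positivity
  show (if |0 + R - L - Q| ≥ |0 + R - L + Q| then |0 + R - L - Q| else |0 + R - L + Q|)
      = |R - L| + Q
  simp only [Int.abs_eq_natAbs]
  split_ifs with h <;> omega
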